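-- pv_equiv track=rewrite | github.com/chedbrandh/glabra | glabra/dedge.py | _get_end_overlap_dict
-- ===== SOURCE A (Python) =====
-- ILLEGAL_LEN_MSG = "n-gram '{0}' is not of length {1}"
--
-- def _get_end_overlap_dict(end_ngs, len_overlap, len_end):
--   """Given end_ngs and len_overlap returns an overlap dictionary.
--
--   The resulting overlap dictionary is intended to be used to find an overlap
--   from one n-gram to other n-gram where there is an overlap of length
--   len_overlap.
--
--   The overlap dictionary will have keys of length len_overlap consisting of
--   the len_overlap first elements in the end_ngs n-grams, and the value
--   will be the n-gram itself.
--
--   E.g.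
--   end_ngs = ["sdfg", "sdru", "werz", "1234"]
--   len_overlap = 2
--   returns {"sd": set(["sdfg", "sdru"]), "we": set(["werz"]), "12": set(["1234"])}
--
--   end_ngs = ["sdf", "wdr", "wer", "123"]
--   len_overlap = 1
--   returns {"s": set(["sdf"]), "w": set(["wdr", "wer"], "1": set(["123"])}
--
--   Args:
--     end_ngs: The n-grams to be put in the overlap dictionary.
--     len_overlap: The length of the n-gram overlap.
--     len_end: The expected length of the n-grams in end_ngs. This is only
--       used to validate the length of the contents of end_ngs.
--
--   Returns:
--     The overlap dictionary for the given n-grams.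
--   """
--   result = {}
--   for ng in end_ngs:
--     assert len(ng) == len_end
--     if len(ng) != len_end:
--       raise ValueError(ILLEGAL_LEN_MSG.format(ng, len_end))
--     result.setdefault(ng[:len_overlap], set()).add(ng)
--   return result
-- ===== SOURCE B (Python) =====
-- ILLEGAL_LEN_MSG = "n-gram '{0}' is not of length {1}"
--
-- def _get_end_overlap_dict(end_ngs, len_overlap, len_end):
--   for ng in end_ngs:
--     assert len(ng) == len_end
--     if len(ng) != len_end:
--       raise ValueError(ILLEGAL_LEN_MSG.format(ng, len_end))
--   keys = []
--   seen = set()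
--   for ng in end_ngs:
--     k = ng[:len_overlap]
--     if k not in seen:
--       seen.add(k)
--       keys.append(k)
--   return {k: {ng for ng in end_ngs if ng[:len_overlap] == k} for k in keys}
-- ===== Notes on version B (the rewrite author's own statement) =====
-- stated objective: alternative
-- what changed: A builds the dict incrementally in one pass with setdefault(...).add; B works in staged passes: validate lengths, collect the distinct prefixes in first-occurrence order, then build each key's whole group at once by a comprehension over the full list (no incremental dict mutation).
import Mathlib
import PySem

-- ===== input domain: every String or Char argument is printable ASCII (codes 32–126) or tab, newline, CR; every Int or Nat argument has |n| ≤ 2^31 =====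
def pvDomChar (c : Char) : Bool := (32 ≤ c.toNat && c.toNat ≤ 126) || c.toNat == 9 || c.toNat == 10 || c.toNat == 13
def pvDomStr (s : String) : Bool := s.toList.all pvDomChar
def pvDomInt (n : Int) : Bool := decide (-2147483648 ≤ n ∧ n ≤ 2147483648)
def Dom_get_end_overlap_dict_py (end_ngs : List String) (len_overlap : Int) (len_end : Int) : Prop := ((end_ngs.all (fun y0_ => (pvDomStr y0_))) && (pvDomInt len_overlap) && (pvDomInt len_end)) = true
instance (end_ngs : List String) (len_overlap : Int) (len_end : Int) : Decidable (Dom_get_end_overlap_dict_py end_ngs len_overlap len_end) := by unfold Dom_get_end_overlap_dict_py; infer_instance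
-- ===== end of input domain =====

-- B replaces A's incremental setdefault-bucketing with staged passes: validate, list the distinct
-- prefixes in first-occurrence order, then build each key's whole group at once (alternative, not faster).


-- ===== PORT A =====
-- A: one pass; result.setdefault(ng[:len_overlap], set()).add(ng) is Dict.modify with Set.add.
-- The 'assert len(ng) == len_end' raises exactly outside Pre_ (the ValueError branch after it is unreachable).
def get_end_overlap_dict_py (end_ngs : List String) (len_overlap : Int) (len_end : Int) : List (String × List String) :=
  (end_ngs.foldl
    (fun (d : PySem.Dict String (PySem.Set String)) ng =>
      d.modify (PySem.Str.slice ng none (some len_overlap)) PySem.Set.empty (fun s => PySem.Set.add s ng))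
    PySem.Dict.empty).items

-- ===== PORT B =====
-- B: the validation pass of Source B computes nothing and raises exactly outside Pre_; the seen/keys loop
-- collects the distinct prefixes in first-occurrence order (= PySem.Set.ofList of the mapped prefixes);
-- the final dict comprehension over these distinct keys is a plain map building each group by filtering.
def get_end_overlap_dict_py_alt (end_ngs : List String) (len_overlap : Int) (len_end : Int) : List (String × List String) :=
  (PySem.Set.ofList (end_ngs.map (fun ng => PySem.Str.slice ng none (some len_overlap)))).map
    (fun k => (k, PySem.Set.ofList (end_ngs.filter (fun ng => PySem.Str.slice ng none (some len_overlap) == k))))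

-- ===== PRECONDITION & SPEC =====
-- Pre_ excludes exactly the inputs where A's assert fails (some n-gram's length ≠ len_end): there
-- Python A raises AssertionError (and B raises the same AssertionError in its validation pass).
def Pre_get_end_overlap_dict_py (end_ngs : List String) (len_overlap : Int) (len_end : Int) : Prop :=
  (end_ngs.all (fun ng => PySem.Str.len ng == len_end)) = true
instance (end_ngs : List String) (len_overlap : Int) (len_end : Int) : Decidable (Pre_get_end_overlap_dict_py end_ngs len_overlap len_end) := by unfold Pre_get_end_overlap_dict_py; infer_instance

def pvWitness_get_end_overlap_dict_py : List String × Int × Int := (["ab", "ax", "cd"], 1, 2)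

def Spec_get_end_overlap_dict_py (end_ngs : List String) (len_overlap : Int) (len_end : Int) (out : List (String × List String)) : Prop := out = get_end_overlap_dict_py_alt end_ngs len_overlap len_end
instance (end_ngs : List String) (len_overlap : Int) (len_end : Int) (out : List (String × List String)) : Decidable (Spec_get_end_overlap_dict_py end_ngs len_overlap len_end out) := by unfold Spec_get_end_overlap_dict_py; infer_instance

-- ===== CLAIM (what is proved, stated in full; the proofs are below) =====
def Claim_equal_get_end_overlap_dict_py : Prop := ∀ (end_ngs : List String) (len_overlap : Int) (len_end : Int), Dom_get_end_overlap_dict_py end_ngs len_overlap len_end → Pre_get_end_overlap_dict_py end_ngs len_overlap len_end → Spec_get_end_overlap_dict_py end_ngs len_overlap len_end (get_end_overlap_dict_py end_ngs len_overlap len_end)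

-- ===== LEMMAS AND PROOFS =====

-- the value B computes, over a prefix-source list p (used for the fold invariant on A)
def pvGroups (L : List String) (lo : Int) (src : List String) : List (String × List String) :=
  (PySem.Set.ofList (src.map (fun g => PySem.Str.slice g none (some lo)))).map
    (fun c => (c, PySem.Set.ofList (L.filter (fun g => PySem.Str.slice g none (some lo) == c))))

lemma pvKeys_groups (L : List String) (lo : Int) (src : List String) :
    (pvGroups L lo src).map Prod.fst
      = PySem.Set.ofList (src.map (fun g => PySem.Str.slice g none (some lo))) := by
  unfold pvGroups
  rw [List.map_map]
  exact (List.map_congr_left (fun a _ => rfl)).trans (List.map_id _)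

lemma pvA_items (lo : Int) (l : List String) :
    (l.foldl
      (fun (d : PySem.Dict String (PySem.Set String)) ng =>
        d.modify (PySem.Str.slice ng none (some lo)) PySem.Set.empty (fun s => PySem.Set.add s ng))
      PySem.Dict.empty).items = pvGroups l lo l := by
  induction l using List.reverseRecOn with
  | nil => rfl
  | append_singleton l g ih =>
    rw [List.foldl_append, List.foldl_cons, List.foldl_nil]
    set d := l.foldl
      (fun (d : PySem.Dict String (PySem.Set String)) ng =>
        d.modify (PySem.Str.slice ng none (some lo)) PySem.Set.empty (fun s => PySem.Set.add s ng))
      PySem.Dict.empty with hdd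
    have hkeys : d.keys = PySem.Set.ofList (l.map (fun x => PySem.Str.slice x none (some lo))) := by
      show d.items.map Prod.fst = _
      rw [ih, pvKeys_groups]
    have hnd : d.keys.Nodup := by rw [hkeys]; exact PySem.Set.nodup_ofList _
    by_cases hin : PySem.Str.slice g none (some lo)
        ∈ PySem.Set.ofList (l.map (fun x => PySem.Str.slice x none (some lo)))
    · have hcont : d.contains (PySem.Str.slice g none (some lo)) = true := by
        simp [PySem.Dict.contains_eq_decide_mem_keys, hkeys, hin]
      have hmem : (PySem.Str.slice g none (some lo),
          PySem.Set.ofList (l.filter (fun x =>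
            PySem.Str.slice x none (some lo) == PySem.Str.slice g none (some lo)))) ∈ d.items := by
        rw [ih]; exact List.mem_map.2 ⟨_, hin, rfl⟩
      have hget : d.getD (PySem.Str.slice g none (some lo)) PySem.Set.empty
          = PySem.Set.ofList (l.filter (fun x =>
            PySem.Str.slice x none (some lo) == PySem.Str.slice g none (some lo))) :=
        PySem.Dict.getD_of_mem_items d hmem hnd _
      simp only [PySem.Dict.modify]
      rw [PySem.Dict.items_insert_of_contains d _ hcont, ih, hget]
      unfold pvGroups
      rw [List.map_map, List.map_append]
      simp only [List.map_cons, List.map_nil]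
      rw [PySem.Set.ofList_append_singleton, PySem.Set.add_of_mem hin]
      apply List.map_congr_left
      intro c hc
      by_cases hc' : c = PySem.Str.slice g none (some lo)
      · subst hc'
        simp [Function.comp, List.filter_append, PySem.Set.ofList_append_singleton]
      · have hbe : (PySem.Str.slice g none (some lo) == c) = false := by
          simp only [beq_eq_false_iff_ne, ne_eq]
          exact fun h => hc' h.symm
        simp [Function.comp, List.filter_append, hc', hbe]
    · have hcont : d.contains (PySem.Str.slice g none (some lo)) = false := by
        simp [PySem.Dict.contains_eq_decide_mem_keys, hkeys, hin]
      have hfil : l.filter (fun x =>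
          PySem.Str.slice x none (some lo) == PySem.Str.slice g none (some lo)) = [] := by
        rw [List.filter_eq_nil_iff]
        intro a ha hKa
        exact hin ((PySem.Set.mem_ofList _ _).2 (List.mem_map.2 ⟨a, ha, eq_of_beq hKa⟩))
      simp only [PySem.Dict.modify]
      rw [PySem.Dict.items_insert_of_not_contains d _ hcont, ih,
        PySem.Dict.getD_of_not_contains d _ hcont]
      unfold pvGroups
      rw [List.map_append]
      simp only [List.map_cons, List.map_nil]
      rw [PySem.Set.ofList_append_singleton, PySem.Set.add_of_not_mem hin, List.map_append]
      congr 1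
      · apply List.map_congr_left
        intro c hc
        have hbe : (PySem.Str.slice g none (some lo) == c) = false := by
          simp only [beq_eq_false_iff_ne, ne_eq]
          intro h
          exact hin (h ▸ hc)
        simp [List.filter_append, hbe]
      · simp [List.filter_append, hfil, PySem.Set.ofList]

-- ===== VERDICT (by name: the statement is the Claim_ definition above) =====
theorem get_end_overlap_dict_py_spec : Claim_equal_get_end_overlap_dict_py := by
  intro end_ngs lo le _ _
  unfold Spec_get_end_overlap_dict_py get_end_overlap_dict_py get_end_overlap_dict_py_alt
  rw [pvA_items]
  rfl
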